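-- pv_equiv track=rewrite | github.com/howekatie/slotter | slotter/views.py | tally_student_availability
-- ===== SOURCE A (Python) =====
-- def tally_student_availability(avail_dict):
--     student_tally = {}
--     only_availability = {}
--     for timeslot in avail_dict:
--         for student in avail_dict[timeslot]:
--             if student not in student_tally:
--                 student_tally[student] = 1
--             else:
--                 student_tally[student] += 1
--     for student in student_tally:
--         if student_tally[student] == 1:
--             for timeslot in avail_dict:
--                 if student in avail_dict[timeslot]:
--                     only_availability[student] = timeslot
--     return only_availability
-- ===== SOURCE B (Python) =====
-- def tally_student_availability(avail_dict):
--     # one pass: per student keep (occurrence count, timeslot of last occurrence)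
--     info = {}
--     for ts, students in avail_dict.items():
--         for s in students:
--             c, _ = info.get(s, (0, None))
--             info[s] = (c + 1, ts)
--     return {s: ts for s, (c, ts) in info.items() if c == 1}
-- ===== Notes on version B (the rewrite author's own statement) =====
-- stated objective: faster
-- what changed: Replaces A's tally pass plus per-student rescan of every timeslot list with a single pass over the occurrences that records each student's count and last timeslot, then one filter over that map.
import Mathlib
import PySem

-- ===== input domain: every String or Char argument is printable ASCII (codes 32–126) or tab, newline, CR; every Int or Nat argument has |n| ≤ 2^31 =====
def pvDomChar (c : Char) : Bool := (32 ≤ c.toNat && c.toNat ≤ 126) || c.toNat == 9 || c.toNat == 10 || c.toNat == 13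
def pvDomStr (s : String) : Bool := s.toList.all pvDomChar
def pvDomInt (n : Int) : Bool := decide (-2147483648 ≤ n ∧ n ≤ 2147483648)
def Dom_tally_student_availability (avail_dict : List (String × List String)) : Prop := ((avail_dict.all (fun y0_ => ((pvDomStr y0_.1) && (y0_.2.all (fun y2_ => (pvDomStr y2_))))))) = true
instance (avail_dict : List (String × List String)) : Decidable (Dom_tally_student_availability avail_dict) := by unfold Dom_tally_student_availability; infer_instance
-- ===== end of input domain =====

-- B replaces A's tally pass + per-student rescan of all timeslot lists with one pass
-- recording each student's (count, last timeslot), then a filter (objective: faster).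

-- ===== PORT A =====
def tally_student_availability (avail_dict : List (String × List String)) : List (String × String) :=
  let student_tally : PySem.Dict String Int :=
    avail_dict.foldl (fun d p =>
      p.2.foldl (fun d s =>
        if !d.contains s then d.insert s 1 else d.insert s (d.getD s 0 + 1)) d)
      PySem.Dict.empty
  let only_availability : PySem.Dict String String :=
    student_tally.keys.foldl (fun o s =>
      if student_tally.getD s 0 == 1 then
        avail_dict.foldl (fun o p => if p.2.contains s then o.insert s p.1 else o) o
      else o)
      PySem.Dict.empty
  only_availability.items

-- ===== PORT B =====
def tally_student_availability_alt (avail_dict : List (String × List String)) : List (String × String) :=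
  let info : PySem.Dict String (Int × String) :=
    avail_dict.foldl (fun d p =>
      p.2.foldl (fun d s => d.insert s ((d.getD s (0, "")).1 + 1, p.1)) d)
      PySem.Dict.empty
  info.items.filterMap (fun e => if e.2.1 == 1 then some (e.1, e.2.2) else none)

-- ===== PRECONDITION & SPEC =====
def Spec_tally_student_availability (avail_dict : List (String × List String)) (out : List (String × String)) : Prop := out = tally_student_availability_alt avail_dict
instance (avail_dict : List (String × List String)) (out : List (String × String)) : Decidable (Spec_tally_student_availability avail_dict out) := by unfold Spec_tally_student_availability; infer_instance

-- ===== CLAIM (what is proved, stated in full; the proofs are below) =====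
def Claim_equal_tally_student_availability : Prop := ∀ (avail_dict : List (String × List String)), Dom_tally_student_availability avail_dict → Spec_tally_student_availability avail_dict (tally_student_availability avail_dict)

-- ===== LEMMAS AND PROOFS =====

/-- all student occurrences, in iteration order -/
def pvAllS (xs : List (String × List String)) : List String := xs.flatMap (·.2)

/-- all (student, timeslot) occurrences, in iteration order -/
def pvOcc (xs : List (String × List String)) : List (String × String) :=
  xs.flatMap (fun p => p.2.map (fun s => (s, p.1)))

/-- B's per-occurrence step -/
def pvStepB (d : PySem.Dict String (Int × String)) (q : String × String) : PySem.Dict String (Int × String) :=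
  d.insert q.1 ((d.getD q.1 (0, "")).1 + 1, q.2)

lemma pvA_flatten (xs : List (String × List String)) (g : PySem.Dict String Int → String → PySem.Dict String Int)
    (d : PySem.Dict String Int) :
    xs.foldl (fun d p => p.2.foldl g d) d = (pvAllS xs).foldl g d := by
  induction xs generalizing d with
  | nil => rfl
  | cons p t ih => simp [pvAllS, List.flatMap_cons, List.foldl_append] at *; rw [ih]

lemma pvStepA_merge (d : PySem.Dict String Int) (s : String) :
    (if !d.contains s then d.insert s 1 else d.insert s (d.getD s 0 + 1))
      = d.insert s (d.getD s 0 + 1) := by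
  by_cases h : d.contains s
  · simp [h]
  · simp only [Bool.not_eq_true] at h
    simp [h, PySem.Dict.getD_of_not_contains (h := h)]

lemma pvTally_eq_counter (xs : List (String × List String)) :
    (xs.foldl (fun d p =>
      p.2.foldl (fun d s =>
        if !d.contains s then d.insert s 1 else d.insert s (d.getD s 0 + 1)) d)
      PySem.Dict.empty) = PySem.Dict.counter (pvAllS xs) := by
  rw [pvA_flatten]
  have : (fun (d : PySem.Dict String Int) (s : String) =>
      if !d.contains s then d.insert s 1 else d.insert s (d.getD s 0 + 1))
      = fun d s => d.insert s (d.getD s 0 + 1) := by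
    funext d s; exact pvStepA_merge d s
  rw [this, PySem.Dict.foldl_insert_getD_add_one_eq_counter]

lemma pvB_flatten (xs : List (String × List String)) (d : PySem.Dict String (Int × String)) :
    xs.foldl (fun d p => p.2.foldl (fun d s => d.insert s ((d.getD s (0, "")).1 + 1, p.1)) d) d
      = (pvOcc xs).foldl pvStepB d := by
  induction xs generalizing d with
  | nil => rfl
  | cons p t ih =>
      simp only [List.foldl_cons, pvOcc, List.flatMap_cons, List.foldl_append, List.foldl_map]
      rw [ih]; rfl

lemma pvB_get? (l : List (String × String)) (d : PySem.Dict String (Int × String)) (s : String) :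
    (l.foldl pvStepB d).get? s =
      match l.reverse.find? (fun q => q.1 == s) with
      | some q => some ((d.getD s (0, "")).1 + ((l.map Prod.fst).count s : Int), q.2)
      | none => d.get? s := by
  induction l generalizing d with
  | nil => simp
  | cons q t ih =>
      simp only [List.foldl_cons, List.reverse_cons, List.find?_append, List.map_cons]
      rw [ih]
      cases ht : t.reverse.find? (fun q => q.1 == s) with
      | some r =>
          by_cases hs : s = q.1
          · simp [ht, pvStepB, PySem.Dict.getD_insert, hs, List.count_cons]
            push_cast; ring
          · have hqs : ¬ q.1 = s := fun h => hs h.symm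
            simp [ht, pvStepB, PySem.Dict.getD_insert, hs, hqs, List.count_cons]
      | none =>
          by_cases hq : (q.1 == s) = true
          · have hs : s = q.1 := (beq_iff_eq.mp hq).symm
            have hcnt : (t.map Prod.fst).count s = 0 := by
              rw [List.count_eq_zero]
              intro hmem
              obtain ⟨x, hx, hx1⟩ := List.mem_map.mp hmem
              have := List.find?_eq_none.mp ht x (List.mem_reverse.mpr hx)
              simp [hx1] at this
            simp [ht, pvStepB, PySem.Dict.get?_insert, hq, hs, hcnt, List.count_cons]
            rw [← hs]; exact hcnt
          · have hs : ¬ s = q.1 := fun h => hq (beq_iff_eq.mpr h.symm)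
            simp [ht, pvStepB, PySem.Dict.get?_insert, hq, hs, List.count_cons]

lemma pvB_keys (l : List (String × String)) (d : PySem.Dict String (Int × String)) :
    (l.foldl pvStepB d).keys = PySem.Set.update d.keys (l.map Prod.fst) := by
  exact PySem.Dict.keys_foldl_insert_key l Prod.fst _ d

lemma pvB_nodup (l : List (String × String)) (d : PySem.Dict String (Int × String))
    (h : d.keys.Nodup) : (l.foldl pvStepB d).keys.Nodup := by
  exact PySem.Dict.nodup_keys_foldl_insert_key l Prod.fst _ d h

lemma pvInner (xs : List (String × List String)) (o : PySem.Dict String String) (s : String) :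
    xs.foldl (fun o p => if p.2.contains s then o.insert s p.1 else o) o =
      match xs.reverse.find? (fun p => p.2.contains s) with
      | some p => o.insert s p.1
      | none => o := by
  induction xs using List.reverseRecOn generalizing o with
  | nil => rfl
  | append_singleton xs p ih =>
      rw [List.foldl_append]
      simp only [List.foldl_cons, List.foldl_nil, List.reverse_append, List.reverse_cons,
        List.reverse_nil, List.nil_append, List.cons_append, List.find?_cons]
      rw [ih]
      by_cases hc : p.2.contains s
      · have hm : s ∈ p.2 := by simpa using hc
        cases hfr : xs.reverse.find? (fun p => p.2.contains s) <;>
          simp [hfr, hm, PySem.Dict.insert_insert_self]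
      · have hm : s ∉ p.2 := by simpa using hc
        cases hfr : xs.reverse.find? (fun p => p.2.contains s) <;> simp [hfr, hm]

lemma pvLink (xs : List (String × List String)) (s : String) :
    ((pvOcc xs).reverse.find? (fun q => q.1 == s)).map Prod.snd
      = (xs.reverse.find? (fun p => p.2.contains s)).map Prod.fst := by
  induction xs with
  | nil => rfl
  | cons p t ih =>
      simp only [pvOcc, List.flatMap_cons, List.reverse_cons, List.reverse_append,
        List.find?_append] at *
      cases h1 : (List.flatMap (fun p => p.2.map fun s => (s, p.1)) t).reverse.find?
          (fun q => q.1 == s) with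
      | some r =>
          cases h2 : t.reverse.find? (fun p => p.2.contains s) with
          | some r' => simp only [h1, h2] at ih ⊢; simpa using ih
          | none => rw [h1, h2] at ih; simp at ih
      | none =>
          have h2 : t.reverse.find? (fun p => p.2.contains s) = none := by
            cases h2 : t.reverse.find? (fun p => p.2.contains s) with
            | some r' => rw [h1, h2] at ih; simp at ih
            | none => rfl
          simp only [h1, h2, Option.orElse_eq_or, Option.none_or]
          -- both sides reduce to the block for p
          rw [show (p.2.map fun a => (a, p.1)).reverse = p.2.reverse.map (fun a => (a, p.1)) from
            List.map_reverse.symm]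
          rw [List.find?_map]
          by_cases hc : s ∈ p.2
          · have hmem : s ∈ p.2.reverse := List.mem_reverse.mpr hc
            have hsome : (p.2.reverse.find? (fun a => a == s)).isSome := by
              rw [List.find?_isSome]; exact ⟨s, hmem, by simp⟩
            obtain ⟨a, ha⟩ := Option.isSome_iff_exists.mp hsome
            have ha2 : a = s := by
              have := List.find?_some ha
              exact beq_iff_eq.mp this
            simp [ha, hc, Function.comp]
            exact ⟨a, ha⟩
          · have hnone : p.2.reverse.find? (fun a => a == s) = none := by
              rw [List.find?_eq_none]
              intro a hamem hbeq
              exact hc (beq_iff_eq.mp hbeq ▸ List.mem_reverse.mp hamem)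
            simp [hc, Function.comp]
            exact fun x hx h => hc (h ▸ hx)

lemma pvOuter (cnd : String → Bool) (fnd : String → Option String)
    (K : List String) (o : PySem.Dict String String)
    (hK : K.Nodup) (ho : o.keys.Nodup) (hfresh : ∀ s ∈ K, o.contains s = false) :
    (K.foldl (fun o s => if cnd s then
        (match fnd s with | some t => o.insert s t | none => o) else o) o).items
      = o.items ++ K.filterMap (fun s => if cnd s then (fnd s).map (fun t => (s, t)) else none) := by
  induction K generalizing o with
  | nil => simp
  | cons s K ih =>
      have hKnd : K.Nodup := hK.of_cons
      have hsK : s ∉ K := by simp [List.nodup_cons] at hK; exact hK.1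
      simp only [List.foldl_cons, List.filterMap_cons]
      by_cases hcnd : cnd s
      · cases hf : fnd s with
        | some t =>
            have hfresh0 : o.contains s = false := hfresh s (List.mem_cons_self)
            have hitems : (o.insert s t).items = o.items ++ [(s, t)] :=
              PySem.Dict.items_insert_of_not_contains _ _ hfresh0
            have hnd' : (o.insert s t).keys.Nodup := PySem.Dict.nodup_keys_insert _ _ _ ho
            have hfresh' : ∀ s' ∈ K, (o.insert s t).contains s' = false := by
              intro s' hs'
              rw [PySem.Dict.contains_insert]
              have : s' ≠ s := fun h => hsK (h ▸ hs')
              simp [this, hfresh s' (List.mem_cons_of_mem _ hs')]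
            simp only [hcnd, if_true]
            rw [ih _ hKnd hnd' hfresh', hitems]
            simp only [Option.map_some]
            exact (List.append_assoc _ _ _)
        | none =>
            simp only [hcnd, if_true]
            rw [ih _ hKnd ho (fun s' hs' => hfresh s' (List.mem_cons_of_mem _ hs'))]
            rfl
      · simp only [Bool.not_eq_true] at hcnd
        simp only [hcnd, Bool.false_eq_true, if_false]
        rw [ih _ hKnd ho (fun s' hs' => hfresh s' (List.mem_cons_of_mem _ hs'))]

lemma pvNames_eq (xs : List (String × List String)) : (pvOcc xs).map Prod.fst = pvAllS xs := by
  simp only [pvOcc, pvAllS, List.map_flatMap]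
  have h : ∀ a : String × List String, List.map Prod.fst (List.map (fun s => (s, a.1)) a.2) = a.2 := by
    intro a
    rw [List.map_map, show Prod.fst ∘ (fun s : String => (s, a.1)) = id from rfl, List.map_id]
  exact List.flatMap_congr (fun a _ => h a)

-- ===== VERDICT (by name: the statement is the Claim_ definition above) =====
theorem tally_student_availability_spec : Claim_equal_tally_student_availability := by
  intro xs _
  unfold Spec_tally_student_availability
  -- abbreviations
  set cnd : String → Bool := fun s => ((((pvAllS xs).count s : Int)) == 1) with hcnd
  set fnd : String → Option String :=
    fun s => (xs.reverse.find? (fun p => p.2.contains s)).map Prod.fst with hfnd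
  set info : PySem.Dict String (Int × String) := (pvOcc xs).foldl pvStepB PySem.Dict.empty
    with hinfo
  -- rewrite A's phase-2 step
  have hstep : (fun (o : PySem.Dict String String) (s : String) =>
      if (PySem.Dict.counter (pvAllS xs)).getD s 0 == 1 then
        xs.foldl (fun o p => if p.2.contains s then o.insert s p.1 else o) o
      else o)
      = fun o s => if cnd s then
          (match fnd s with | some t => o.insert s t | none => o) else o := by
    funext o s
    rw [PySem.Dict.getD_counter, pvInner, hcnd, hfnd]
    cases h : xs.reverse.find? (fun p => p.2.contains s) <;>
      simp only [h, Option.map_some, Option.map_none]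
  have hL : tally_student_availability xs
      = (((xs.foldl (fun d p =>
            p.2.foldl (fun d s =>
              if !d.contains s then d.insert s 1 else d.insert s (d.getD s 0 + 1)) d)
            (PySem.Dict.empty : PySem.Dict String Int))).keys.foldl
          (fun o s => if (xs.foldl (fun d p =>
            p.2.foldl (fun d s =>
              if !d.contains s then d.insert s 1 else d.insert s (d.getD s 0 + 1)) d)
            (PySem.Dict.empty : PySem.Dict String Int)).getD s 0 == 1 then
              xs.foldl (fun o p => if p.2.contains s then o.insert s p.1 else o) o
            else o)
          PySem.Dict.empty).items := rfl
  rw [pvTally_eq_counter, hstep] at hL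
  have hR : tally_student_availability_alt xs
      = (xs.foldl (fun d p =>
            p.2.foldl (fun d s => d.insert s ((d.getD s (0, "")).1 + 1, p.1)) d)
            (PySem.Dict.empty : PySem.Dict String (Int × String))).items.filterMap
          (fun e => if e.2.1 == 1 then some (e.1, e.2.2) else none) := rfl
  rw [pvB_flatten] at hR
  rw [hL, hR]
  -- A's result via pvOuter
  have hKnd : (PySem.Dict.counter (pvAllS xs)).keys.Nodup := PySem.Dict.nodup_keys_counter _
  have hA := pvOuter cnd fnd (PySem.Dict.counter (pvAllS xs)).keys PySem.Dict.empty hKnd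
    (by simp) (by simp)
  rw [hA]
  -- B's result via items_eq_map_keys
  have hBnd : info.keys.Nodup := pvB_nodup _ _ (by simp)
  rw [PySem.Dict.items_eq_map_keys info hBnd (0, ""), List.filterMap_map]
  have hkeysB : info.keys = PySem.Set.ofList (pvAllS xs) := by
    rw [hinfo, pvB_keys, pvNames_eq]
    simp [PySem.Set.update_nil_left]
  rw [hkeysB, PySem.Dict.keys_counter]
  simp only [show (PySem.Dict.empty : PySem.Dict String String).items = [] from rfl,
    List.nil_append]
  -- pointwise agreement on the shared key list
  apply List.filterMap_congr
  intro s hs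
  have hsAll : s ∈ pvAllS xs := (PySem.Set.mem_ofList _ _).mp hs
  have hsOcc : s ∈ (pvOcc xs).map Prod.fst := by rw [pvNames_eq]; exact hsAll
  obtain ⟨x, hx, hx1⟩ := List.mem_map.mp hsOcc
  have hsome : ((pvOcc xs).reverse.find? (fun q => q.1 == s)).isSome := by
    rw [List.find?_isSome]
    exact ⟨x, List.mem_reverse.mpr hx, by simp [hx1]⟩
  obtain ⟨q, hq⟩ := Option.isSome_iff_exists.mp hsome
  have hget : info.get? s = some ((0 : Int) + (((pvOcc xs).map Prod.fst).count s : Int), q.2) := by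
    rw [hinfo, pvB_get? _ _ s, hq]
    simp
  have hgetD : info.getD s (0, "") = ((0 : Int) + (((pvOcc xs).map Prod.fst).count s : Int), q.2) := by
    rw [PySem.Dict.getD_eq_get?_getD, hget]; rfl
  have hfnd_s : fnd s = some q.2 := by
    have := pvLink xs s
    rw [hq] at this
    rw [hfnd]
    exact this.symm.trans (by rfl)
  rw [Function.comp_apply, hgetD, hfnd_s, hcnd]
  simp only [pvNames_eq] 
  by_cases h1 : (((pvAllS xs).count s : Int)) == 1 <;> simp [h1]
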